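-- pv_equiv track=rewrite | github.com/Mmesek/Advent-of-Code | solutions/2021/day_09.py | solve
-- ===== SOURCE A (Python) =====
-- from functools import reduce
--
-- def crawl(x: int, y: int, rows: list[list[int]], previous_value: int, traversed: set = None) -> int:
--     """Crawl basin from starting position x,y increasing size on until hitting 9"""
--     basin = 0
--     if rows[y][x] == 9:
--         return basin
--
--     if not traversed:
--         traversed = set()
--     elif (x, y) in traversed:
--         return basin
--
--     previous_value = rows[y][x]
--     traversed.add((x, y))
--
--     basin += 1
--     if x:
--         basin += crawl(x - 1, y, rows, previous_value, traversed)
--     if len(rows[y]) - 1 > x: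
--         basin += crawl(x + 1, y, rows, previous_value, traversed)
--     if y:
--         basin += crawl(x, y - 1, rows, previous_value, traversed)
--     if len(rows) - 1 > y:
--         basin += crawl(x, y + 1, rows, previous_value, traversed)
--     return basin
--
-- def solve(rows: list[int]) -> tuple[int, int]:
--     """Iterates over rows and columns in iterable
--     Counts Low Points and Crawls Basins"""
--     lows = []
--     sizes = []
--     for y, row in enumerate(rows):
--         for x, i in enumerate(row):
--             if (
--                 (not x or row[x - 1] > i)
--                 and (not y or rows[y - 1][x] > i)
--                 and (not len(row) - 1 > x or row[x + 1] > i)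
--                 and (not len(rows) - 1 > y or rows[y + 1][x] > i)
--             ):
--                 lows.append(i)
--                 sizes.append(crawl(x, y, rows, None))
--     largest = sorted(sizes)
--     return sum(lows) + len(lows), reduce(lambda x, y: x * y, largest[-3:])
-- ===== SOURCE B (Python) =====
-- def is_low(rows, row, x, y, i):
--     """Strict local minimum test (non-existent neighbours count as higher)."""
--     return ((not x or row[x - 1] > i)
--             and (not y or rows[y - 1][x] > i)
--             and (not len(row) - 1 > x or row[x + 1] > i)
--             and (not len(rows) - 1 > y or rows[y + 1][x] > i))
--
-- def basin_size(rows, x, y):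
--     """Iterative flood fill: count connected non-9 cells reachable from (x, y)."""
--     stack = [(x, y)]
--     visited = set()
--     size = 0
--     while stack:
--         cx, cy = stack.pop()
--         if rows[cy][cx] == 9 or (cx, cy) in visited:
--             continue
--         visited.add((cx, cy))
--         size += 1
--         if len(rows) - 1 > cy:
--             stack.append((cx, cy + 1))
--         if cy:
--             stack.append((cx, cy - 1))
--         if len(rows[cy]) - 1 > cx:
--             stack.append((cx + 1, cy))
--         if cx:
--             stack.append((cx - 1, cy))
--     return size
--
-- def solve(rows):
--     lows = [(x, y, i)
--             for y, row in enumerate(rows)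
--             for x, i in enumerate(row)
--             if is_low(rows, row, x, y, i)]
--     sizes = sorted(basin_size(rows, x, y) for x, y, _ in lows)
--     top = sizes[-3:]
--     prod = top[0]
--     for v in top[1:]:
--         prod *= v
--     return sum(i for _, _, i in lows) + len(lows), prod
-- ===== Notes on version B (the rewrite author's own statement) =====
-- stated objective: alternative
-- what changed: The recursive basin crawl (threading a mutated visited set through four recursive calls) is replaced by an iterative stack-based flood fill with an explicit worklist, and the low-point scan that appended to two parallel accumulator lists becomes a comprehension over enumerated cells with an is_low helper.
-- outside the precondition, e.g. on solve([[8, 3, 4], [9, 3, 7, 9], [0]]): A returns (1, 1), B returns (1, 1); on solve([[1, 2], [3]]): A raises IndexError, B raises IndexError; on solve([[1, 1]]): A raises TypeError, B raises IndexError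
import Mathlib
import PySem

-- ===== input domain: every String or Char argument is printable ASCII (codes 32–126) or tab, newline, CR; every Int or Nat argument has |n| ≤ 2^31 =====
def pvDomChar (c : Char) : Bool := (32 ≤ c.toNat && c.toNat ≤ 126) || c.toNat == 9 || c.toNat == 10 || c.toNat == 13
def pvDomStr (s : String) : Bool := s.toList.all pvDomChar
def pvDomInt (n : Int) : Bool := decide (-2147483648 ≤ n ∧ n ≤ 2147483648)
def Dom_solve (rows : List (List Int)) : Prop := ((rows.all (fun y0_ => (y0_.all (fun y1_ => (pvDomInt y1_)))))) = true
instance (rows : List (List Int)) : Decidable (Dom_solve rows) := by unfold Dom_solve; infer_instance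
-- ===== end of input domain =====

-- B replaces A's recursive basin crawl by an iterative stack flood fill and the
-- accumulator-list scan by a comprehension; same return value (objective: alternative).

-- All wrap-reachable cell indices (x, y) for which rows[y][x] succeeds under
-- Python indexing (negative indices wrap); its length bounds the recursion and
-- is used only as a totality fuel guard for the ports' loops.
def wrapCells (rows : List (List Int)) : List (Int × Int) :=
  (PySem.List.pyRange (-(rows.length : Int)) (rows.length : Int) 1).flatMap (fun y =>
    match PySem.List.pyGet? rows y with
    | none => []
    | some row => (PySem.List.pyRange (-(row.length : Int)) (row.length : Int) 1).map (fun x => (x, y)))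

-- ===== PORT A =====
-- literal port of crawl; the visited set is threaded through the calls exactly as
-- Python mutates it; fuel is a totality guard only (wrapCells.length + 1 always suffices).
def crawlA (fuel : Nat) (x y : Int) (rows : List (List Int)) (t : PySem.Set (Int × Int)) :
    Int × PySem.Set (Int × Int) :=
  match fuel with
  | 0 => (0, t)
  | fuel + 1 =>
    match PySem.List.pyGet? rows y with
    | none => (0, t)  -- Python would raise IndexError; unreachable under Pre_
    | some row =>
      match PySem.List.pyGet? row x with
      | none => (0, t)  -- IndexError; unreachable under Pre_
      | some v =>
        if v = 9 then (0, t)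
        else if (PySem.Set.contains t (x, y) : Bool) then (0, t)
        else
          let t1 := PySem.Set.add t (x, y)
          let r1 := if x ≠ 0 then crawlA fuel (x - 1) y rows t1 else (0, t1)
          let r2 := if (row.length : Int) - 1 > x then crawlA fuel (x + 1) y rows r1.2 else (0, r1.2)
          let r3 := if y ≠ 0 then crawlA fuel x (y - 1) rows r2.2 else (0, r2.2)
          let r4 := if (rows.length : Int) - 1 > y then crawlA fuel x (y + 1) rows r3.2 else (0, r3.2)
          (1 + r1.1 + r2.1 + r3.1 + r4.1, r4.2)

def solve (rows : List (List Int)) : Int × Int :=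
  let st :=
    (PySem.List.enumerate rows 0).foldl (fun (acc : List Int × List Int) p =>
      (PySem.List.enumerate p.2 0).foldl (fun acc q =>
        if (q.1 = 0 ∨ PySem.List.pyGetD p.2 (q.1 - 1) 0 > q.2) ∧
           (p.1 = 0 ∨ PySem.List.pyGetD (PySem.List.pyGetD rows (p.1 - 1) []) q.1 0 > q.2) ∧
           (¬((p.2.length : Int) - 1 > q.1) ∨ PySem.List.pyGetD p.2 (q.1 + 1) 0 > q.2) ∧
           (¬((rows.length : Int) - 1 > p.1) ∨ PySem.List.pyGetD (PySem.List.pyGetD rows (p.1 + 1) []) q.1 0 > q.2)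
        then (acc.1 ++ [q.2], acc.2 ++ [(crawlA ((wrapCells rows).length + 1) q.1 p.1 rows PySem.Set.empty).1])
        else acc) acc) ([], [])
  let largest := PySem.List.sorted st.2 (fun z => z) false
  (st.1.sum + (st.1.length : Int),
   match PySem.List.slice largest (some (-3)) none with
   | [] => 0  -- Python's reduce raises TypeError on an empty list; unreachable under Pre_
   | h :: tl => tl.foldl (· * ·) h)

-- ===== PORT B =====
def isLowB (rows : List (List Int)) (row : List Int) (x y i : Int) : Bool :=
  decide ((x = 0 ∨ PySem.List.pyGetD row (x - 1) 0 > i) ∧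
          (y = 0 ∨ PySem.List.pyGetD (PySem.List.pyGetD rows (y - 1) []) x 0 > i) ∧
          (¬((row.length : Int) - 1 > x) ∨ PySem.List.pyGetD row (x + 1) 0 > i) ∧
          (¬((rows.length : Int) - 1 > y) ∨ PySem.List.pyGetD (PySem.List.pyGetD rows (y + 1) []) x 0 > i))

-- iterative flood fill; the list is the stack (head = top); fuel is a totality
-- guard only (5 * wrapCells.length + 1 always suffices for B's calls).
def floodB (rows : List (List Int)) :
    Nat → List (Int × Int) → PySem.Set (Int × Int) → Int → Int
  | 0, _, _, size => size
  | _ + 1, [], _, size => size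
  | fuel + 1, (x, y) :: rest, visited, size =>
    match PySem.List.pyGet? rows y with
    | none => floodB rows fuel rest visited size  -- IndexError in Python; unreachable under Pre_
    | some row =>
      match PySem.List.pyGet? row x with
      | none => floodB rows fuel rest visited size  -- IndexError; unreachable under Pre_
      | some v =>
        if v = 9 ∨ (PySem.Set.contains visited (x, y) : Bool) then
          floodB rows fuel rest visited size
        else
          floodB rows fuel
            ((if x ≠ 0 then [(x - 1, y)] else []) ++
             (if (row.length : Int) - 1 > x then [(x + 1, y)] else []) ++
             (if y ≠ 0 then [(x, y - 1)] else []) ++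
             (if (rows.length : Int) - 1 > y then [(x, y + 1)] else []) ++ rest)
            (PySem.Set.add visited (x, y)) (size + 1)

def solve_alt (rows : List (List Int)) : Int × Int :=
  let lows :=
    (PySem.List.enumerate rows 0).flatMap (fun p =>
      ((PySem.List.enumerate p.2 0).filter (fun q => isLowB rows p.2 q.1 p.1 q.2)).map
        (fun q => (q.1, p.1, q.2)))
  let sizes := PySem.List.sorted
    (lows.map (fun l => floodB rows (5 * (wrapCells rows).length + 1) [(l.1, l.2.1)] PySem.Set.empty 0))
    (fun z => z) false
  let top := PySem.List.slice sizes (some (-3)) none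
  ((lows.map (fun l => l.2.2)).sum + (lows.length : Int),
   match top with
   | [] => 0  -- top[0] raises IndexError in Python; unreachable under Pre_
   | h :: tl => tl.foldl (· * ·) h)

-- ===== PRECONDITION & SPEC =====
-- Pre_ excludes inputs on which the Pythons raise: non-rectangular grids (the scan or the
-- crawl indexes a missing column, usually IndexError — on a few ragged grids A happens to
-- return, and B returns the same value there) and grids without a strict low point
-- (reduce over the empty list raises TypeError in A, top[0] raises IndexError in B).
def Pre_solve (rows : List (List Int)) : Prop :=
  (rows.all (fun row => row.length == (rows.headD []).length)) = true ∧
  ((PySem.List.enumerate rows 0).any (fun p =>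
    (PySem.List.enumerate p.2 0).any (fun q =>
      decide ((q.1 = 0 ∨ PySem.List.pyGetD p.2 (q.1 - 1) 0 > q.2) ∧
              (p.1 = 0 ∨ PySem.List.pyGetD (PySem.List.pyGetD rows (p.1 - 1) []) q.1 0 > q.2) ∧
              (¬((p.2.length : Int) - 1 > q.1) ∨ PySem.List.pyGetD p.2 (q.1 + 1) 0 > q.2) ∧
              (¬((rows.length : Int) - 1 > p.1) ∨ PySem.List.pyGetD (PySem.List.pyGetD rows (p.1 + 1) []) q.1 0 > q.2))))) = true
instance (rows : List (List Int)) : Decidable (Pre_solve rows) := by unfold Pre_solve; infer_instance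

def pvWitness_solve : List (List Int) := [[1]]

def Spec_solve (rows : List (List Int)) (out : Int × Int) : Prop := out = solve_alt rows
instance (rows : List (List Int)) (out : Int × Int) : Decidable (Spec_solve rows out) := by unfold Spec_solve; infer_instance

-- ===== CLAIM (what is proved, stated in full; the proofs are below) =====
def Claim_equal_solve : Prop := ∀ (rows : List (List Int)), Dom_solve rows → Pre_solve rows → Spec_solve rows (solve rows)

-- ===== LEMMAS AND PROOFS =====

-- the number of wrap-indexable cells not yet visited: the proofs' potential function
def unvis (rows : List (List Int)) (t : PySem.Set (Int × Int)) : Nat :=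
  ((wrapCells rows).filter (fun c => !(PySem.Set.contains t c))).length

theorem filt_mono {α : Type} (l : List α) (p q : α → Bool) (h : ∀ c ∈ l, p c = true → q c = true) :
    (l.filter p).length ≤ (l.filter q).length := by
  induction l with
  | nil => simp
  | cons a l ih =>
    simp only [List.filter_cons]
    have h2 := ih (fun c hc => h c (List.mem_cons_of_mem _ hc))
    by_cases hp : p a = true
    · rw [hp, h a List.mem_cons_self hp]; simpa using h2
    · simp only [Bool.not_eq_true] at hp; rw [hp]
      cases hq : q a <;> simp <;> omega

theorem filt_strict {α : Type} (l : List α) (p q : α → Bool) (a : α)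
    (h : ∀ c, p c = true → q c = true) (ha : a ∈ l) (hpa : p a = false) (hqa : q a = true) :
    (l.filter p).length + 1 ≤ (l.filter q).length := by
  induction l with
  | nil => simp at ha
  | cons b l ih =>
    simp only [List.filter_cons]
    have hmono := filt_mono l p q (fun c _ hc => h c hc)
    rcases List.mem_cons.mp ha with heq | hbl
    · subst heq
      rw [hpa, hqa]; simp; omega
    · have := ih hbl
      by_cases hpb : p b = true
      · rw [hpb, h b hpb]; simpa using this
      · simp only [Bool.not_eq_true] at hpb; rw [hpb]
        cases hqb : q b <;> simp <;> omega

theorem pyGet?_bounds {α : Type} (xs : List α) (y : Int) (r : α) (h : PySem.List.pyGet? xs y = some r) :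
    -(xs.length : Int) ≤ y ∧ y < xs.length := by
  have := PySem.List.pyGet?_eq_none_iff (xs := xs) (i := y)
  unfold PySem.Raise.InRange at this
  rw [h] at this; simp at this; omega

theorem mem_wrapCells {rows : List (List Int)} {x y : Int} {row : List Int} {v : Int}
    (hrow : PySem.List.pyGet? rows y = some row) (hv : PySem.List.pyGet? row x = some v) :
    (x, y) ∈ wrapCells rows := by
  unfold wrapCells
  rw [List.mem_flatMap]
  refine ⟨y, ?_, ?_⟩
  · have := pyGet?_bounds rows y row hrow
    rw [PySem.List.mem_pyRange_one]; omega
  · rw [hrow]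
    have := pyGet?_bounds row x v hv
    rw [List.mem_map]
    exact ⟨x, by rw [PySem.List.mem_pyRange_one]; omega, rfl⟩

theorem unvis_add_lt {rows : List (List Int)} {t : PySem.Set (Int × Int)} {x y : Int}
    (hmem : (x, y) ∈ wrapCells rows) (hnc : PySem.Set.contains t (x, y) = false) :
    unvis rows (PySem.Set.add t (x, y)) + 1 ≤ unvis rows t := by
  unfold unvis
  apply filt_strict _ _ _ (x, y) ?_ hmem ?_ (by rw [hnc]; rfl)
  · intro c hc
    simp only [Bool.not_eq_true'] at hc ⊢
    cases hct : PySem.Set.contains t c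
    · rfl
    · rw [PySem.Set.contains_iff] at hct
      have hm : c ∈ PySem.Set.add t (x, y) := by rw [PySem.Set.mem_add]; exact Or.inl hct
      rw [← PySem.Set.contains_iff] at hm; rw [hm] at hc; exact hc
  · have hm : (x, y) ∈ PySem.Set.add t (x, y) := by rw [PySem.Set.mem_add]; right; rfl
    rw [← PySem.Set.contains_iff] at hm; rw [hm]; rfl

theorem floodB_nil (rows : List (List Int)) (fuel : Nat) (t : PySem.Set (Int × Int)) (size : Int) :
    floodB rows fuel [] t size = size := by
  cases fuel <;> rfl

-- main lemma: the flood fill consumes the crawl's subtree from the top of the stack,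
-- adding the crawl's basin count to the running size and visiting the same set.
theorem crawl_flood (rows : List (List Int)) :
    ∀ (fa : Nat) (x y : Int) (t : PySem.Set (Int × Int)) (b : Int) (t' : PySem.Set (Int × Int)),
      unvis rows t < fa → crawlA fa x y rows t = (b, t') →
      ∃ k, k + 5 * unvis rows t' ≤ 1 + 5 * unvis rows t ∧
        ∀ (stack : List (Int × Int)) (size : Int) (fb : Nat),
          floodB rows (fb + k) ((x, y) :: stack) t size = floodB rows fb stack t' (size + b) := by
  intro fa
  induction fa with
  | zero => intro x y t b t' hu _; exact absurd hu (Nat.not_lt_zero _)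
  | succ n ih =>
    intro x y t b t' hu hc
    rw [crawlA] at hc
    cases hrow : PySem.List.pyGet? rows y with
    | none =>
      rw [hrow] at hc
      dsimp only [] at hc
      injection hc with h1 h2; subst h1; subst h2
      refine ⟨1, by omega, fun stack size fb => ?_⟩
      rw [floodB, hrow]; simp
    | some row =>
      rw [hrow] at hc
      dsimp only [] at hc
      cases hv : PySem.List.pyGet? row x with
      | none =>
        rw [hv] at hc
        dsimp only [] at hc
        injection hc with h1 h2; subst h1; subst h2
        refine ⟨1, by omega, fun stack size fb => ?_⟩
        rw [floodB, hrow]; dsimp only []; rw [hv]; simp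
      | some v =>
        rw [hv] at hc
        dsimp only [] at hc
        by_cases h9 : v = 9
        · rw [if_pos h9] at hc
          injection hc with h1 h2; subst h1; subst h2
          refine ⟨1, by omega, fun stack size fb => ?_⟩
          rw [floodB, hrow]; dsimp only []; rw [hv]; dsimp only []
          rw [if_pos (Or.inl h9)]; simp
        · rw [if_neg h9] at hc
          cases hvis : PySem.Set.contains t (x, y) with
          | true =>
            rw [hvis] at hc; simp only [if_pos] at hc
            injection hc with h1 h2; subst h1; subst h2
            refine ⟨1, by omega, fun stack size fb => ?_⟩
            rw [floodB, hrow]; dsimp only []; rw [hv]; dsimp only []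
            rw [if_pos (Or.inr hvis)]; simp
          | false =>
            rw [hvis] at hc; simp only [Bool.false_eq_true, if_false] at hc
            have hcell : (x, y) ∈ wrapCells rows := mem_wrapCells hrow hv
            have hu1 : unvis rows (PySem.Set.add t (x, y)) + 1 ≤ unvis rows t :=
              unvis_add_lt hcell hvis
            -- one guarded child step
            have key : ∀ (g : Prop) (inst : Decidable g) (nx ny : Int)
                (tc : PySem.Set (Int × Int)) (b' : Int) (t'' : PySem.Set (Int × Int)),
                unvis rows tc < n →
                @ite _ g inst (crawlA n nx ny rows tc) ((0 : Int), tc) = (b', t'') →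
                ∃ k, k + 5 * unvis rows t'' ≤ 1 + 5 * unvis rows tc ∧
                  ∀ (s : List (Int × Int)) (sz : Int) (fb : Nat),
                    floodB rows (fb + k) ((@ite _ g inst [(nx, ny)] []) ++ s) tc sz
                      = floodB rows fb s t'' (sz + b') := by
              intro g inst nx ny tc b' t'' hlt hg
              by_cases hgg : g
              · rw [if_pos hgg] at hg
                obtain ⟨k, hk1, hk2⟩ := ih nx ny tc b' t'' hlt hg
                exact ⟨k, hk1, fun s sz fb => by rw [if_pos hgg]; exact hk2 s sz fb⟩
              · rw [if_neg hgg] at hg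
                injection hg with h1 h2; subst h1; subst h2
                exact ⟨0, by omega, fun s sz fb => by rw [if_neg hgg]; simp⟩
            set t1 := PySem.Set.add t (x, y) with ht1
            set c1 := if x ≠ 0 then crawlA n (x - 1) y rows t1 else ((0 : Int), t1) with hc1
            set c2 := if (row.length : Int) - 1 > x then crawlA n (x + 1) y rows c1.2 else ((0 : Int), c1.2) with hc2
            set c3 := if y ≠ 0 then crawlA n x (y - 1) rows c2.2 else ((0 : Int), c2.2) with hc3
            set c4 := if (rows.length : Int) - 1 > y then crawlA n x (y + 1) rows c3.2 else ((0 : Int), c3.2) with hc4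
            obtain ⟨k1, hb1, hf1⟩ := key (x ≠ 0) _ (x - 1) y t1 c1.1 c1.2 (by omega) (by rw [← hc1])
            obtain ⟨k2, hb2, hf2⟩ := key ((row.length : Int) - 1 > x) _ (x + 1) y c1.2 c2.1 c2.2 (by omega) (by rw [← hc2])
            obtain ⟨k3, hb3, hf3⟩ := key (y ≠ 0) _ x (y - 1) c2.2 c3.1 c3.2 (by omega) (by rw [← hc3])
            obtain ⟨k4, hb4, hf4⟩ := key ((rows.length : Int) - 1 > y) _ x (y + 1) c3.2 c4.1 c4.2 (by omega) (by rw [← hc4])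
            have hbt : b = 1 + c1.1 + c2.1 + c3.1 + c4.1 ∧ t' = c4.2 := by
              have := hc; exact ⟨(Prod.mk.injEq _ _ _ _ ▸ this).1.symm, (Prod.mk.injEq _ _ _ _ ▸ this).2.symm⟩
            obtain ⟨rfl, rfl⟩ := hbt
            refine ⟨1 + k1 + k2 + k3 + k4, by omega, fun stack size fb => ?_⟩
            have e : fb + (1 + k1 + k2 + k3 + k4) = ((((fb + k4) + k3) + k2) + k1) + 1 := by omega
            rw [e, floodB, hrow]; dsimp only []; rw [hv]; dsimp only []
            rw [if_neg (by rintro (h | h); exact h9 h; exact absurd (hvis ▸ h) Bool.false_ne_true), ← ht1]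
            rw [List.append_assoc, List.append_assoc, List.append_assoc]
            rw [hf1, hf2, hf3, hf4]
            congr 1
            ring


theorem unvis_le (rows : List (List Int)) (t : PySem.Set (Int × Int)) :
    unvis rows t ≤ (wrapCells rows).length :=
  List.length_filter_le _ _

theorem basin_eq (rows : List (List Int)) (x y : Int) :
    floodB rows (5 * (wrapCells rows).length + 1) [(x, y)] PySem.Set.empty 0
      = (crawlA ((wrapCells rows).length + 1) x y rows PySem.Set.empty).1 := by
  have hle := unvis_le rows PySem.Set.empty
  obtain ⟨k, hk, hf⟩ := crawl_flood rows ((wrapCells rows).length + 1) x y PySem.Set.empty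
    (crawlA ((wrapCells rows).length + 1) x y rows PySem.Set.empty).1
    (crawlA ((wrapCells rows).length + 1) x y rows PySem.Set.empty).2
    (by omega) rfl
  have hkb : k ≤ 5 * (wrapCells rows).length + 1 := by omega
  have e : 5 * (wrapCells rows).length + 1 = (5 * (wrapCells rows).length + 1 - k) + k := by omega
  rw [e, hf [] 0 (5 * (wrapCells rows).length + 1 - k), floodB_nil, zero_add]


-- A's inner column loop appends exactly the filtered cells' values and crawl sizes
theorem inner_eq (rows : List (List Int)) (p : Int × List Int) :
    ∀ (l : List (Int × Int)) (acc : List Int × List Int),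
    l.foldl (fun acc q =>
        if (q.1 = 0 ∨ PySem.List.pyGetD p.2 (q.1 - 1) 0 > q.2) ∧
           (p.1 = 0 ∨ PySem.List.pyGetD (PySem.List.pyGetD rows (p.1 - 1) []) q.1 0 > q.2) ∧
           (¬((p.2.length : Int) - 1 > q.1) ∨ PySem.List.pyGetD p.2 (q.1 + 1) 0 > q.2) ∧
           (¬((rows.length : Int) - 1 > p.1) ∨ PySem.List.pyGetD (PySem.List.pyGetD rows (p.1 + 1) []) q.1 0 > q.2)
        then (acc.1 ++ [q.2], acc.2 ++ [(crawlA ((wrapCells rows).length + 1) q.1 p.1 rows PySem.Set.empty).1])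
        else acc) acc
      = (acc.1 ++ (l.filter (fun q => isLowB rows p.2 q.1 p.1 q.2)).map (fun q => q.2),
         acc.2 ++ (l.filter (fun q => isLowB rows p.2 q.1 p.1 q.2)).map
           (fun q => (crawlA ((wrapCells rows).length + 1) q.1 p.1 rows PySem.Set.empty).1)) := by
  intro l
  induction l with
  | nil => intro acc; simp
  | cons a l ih =>
    intro acc
    simp only [List.foldl_cons, List.filter_cons]
    by_cases h : (a.1 = 0 ∨ PySem.List.pyGetD p.2 (a.1 - 1) 0 > a.2) ∧
        (p.1 = 0 ∨ PySem.List.pyGetD (PySem.List.pyGetD rows (p.1 - 1) []) a.1 0 > a.2) ∧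
        (¬((p.2.length : Int) - 1 > a.1) ∨ PySem.List.pyGetD p.2 (a.1 + 1) 0 > a.2) ∧
        (¬((rows.length : Int) - 1 > p.1) ∨ PySem.List.pyGetD (PySem.List.pyGetD rows (p.1 + 1) []) a.1 0 > a.2)
    · rw [if_pos h, ih]
      have hb : isLowB rows p.2 a.1 p.1 a.2 = true := by unfold isLowB; exact decide_eq_true h
      rw [hb]
      simp
    · rw [if_neg h, ih]
      have hb : isLowB rows p.2 a.1 p.1 a.2 = false := by unfold isLowB; exact decide_eq_false h
      rw [hb]
      simp

-- A's row loop builds the flattened lists of low values and crawl sizes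
theorem outer_eq (rows : List (List Int)) :
    ∀ (L : List (Int × List Int)) (acc : List Int × List Int),
    L.foldl (fun acc p =>
      (PySem.List.enumerate p.2 0).foldl (fun acc q =>
        if (q.1 = 0 ∨ PySem.List.pyGetD p.2 (q.1 - 1) 0 > q.2) ∧
           (p.1 = 0 ∨ PySem.List.pyGetD (PySem.List.pyGetD rows (p.1 - 1) []) q.1 0 > q.2) ∧
           (¬((p.2.length : Int) - 1 > q.1) ∨ PySem.List.pyGetD p.2 (q.1 + 1) 0 > q.2) ∧
           (¬((rows.length : Int) - 1 > p.1) ∨ PySem.List.pyGetD (PySem.List.pyGetD rows (p.1 + 1) []) q.1 0 > q.2)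
        then (acc.1 ++ [q.2], acc.2 ++ [(crawlA ((wrapCells rows).length + 1) q.1 p.1 rows PySem.Set.empty).1])
        else acc) acc) acc
      = (acc.1 ++ L.flatMap (fun p =>
           ((PySem.List.enumerate p.2 0).filter (fun q => isLowB rows p.2 q.1 p.1 q.2)).map (fun q => q.2)),
         acc.2 ++ L.flatMap (fun p =>
           ((PySem.List.enumerate p.2 0).filter (fun q => isLowB rows p.2 q.1 p.1 q.2)).map
             (fun q => (crawlA ((wrapCells rows).length + 1) q.1 p.1 rows PySem.Set.empty).1))) := by
  intro L
  induction L with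
  | nil => intro acc; simp
  | cons p L ih =>
    intro acc
    simp only [List.foldl_cons, List.flatMap_cons]
    rw [inner_eq rows p (PySem.List.enumerate p.2 0) acc, ih]
    simp [List.append_assoc]

-- ===== VERDICT (by name: the statement is the Claim_ definition above) =====
theorem solve_spec : Claim_equal_solve := by
  intro rows _ _
  unfold Spec_solve solve solve_alt
  rw [outer_eq rows (PySem.List.enumerate rows 0) ([], [])]
  simp only [List.nil_append]
  have hlows : ((PySem.List.enumerate rows 0).flatMap (fun p =>
      ((PySem.List.enumerate p.2 0).filter (fun q => isLowB rows p.2 q.1 p.1 q.2)).map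
        (fun q => (q.1, p.1, q.2)))).map (fun l => l.2.2)
      = (PySem.List.enumerate rows 0).flatMap (fun p =>
        ((PySem.List.enumerate p.2 0).filter (fun q => isLowB rows p.2 q.1 p.1 q.2)).map (fun q => q.2)) := by
    simp [List.map_flatMap, List.map_map, Function.comp_def]
  have hsizes : ((PySem.List.enumerate rows 0).flatMap (fun p =>
      ((PySem.List.enumerate p.2 0).filter (fun q => isLowB rows p.2 q.1 p.1 q.2)).map
        (fun q => (q.1, p.1, q.2)))).map (fun l =>
          floodB rows (5 * (wrapCells rows).length + 1) [(l.1, l.2.1)] PySem.Set.empty 0)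
      = (PySem.List.enumerate rows 0).flatMap (fun p =>
        ((PySem.List.enumerate p.2 0).filter (fun q => isLowB rows p.2 q.1 p.1 q.2)).map
          (fun q => (crawlA ((wrapCells rows).length + 1) q.1 p.1 rows PySem.Set.empty).1)) := by
    simp only [List.map_flatMap, List.map_map, Function.comp_def]
    congr 1
    funext p
    congr 1
    funext q
    exact basin_eq rows q.1 p.1
  rw [← hlows, ← hsizes]
  simp [List.length_map]
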